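-- pv_equiv track=rewrite | github.com/dancergraham/project_euler | euler (2).py | n_from_base
-- ===== SOURCE A (Python) =====
-- import string
--
-- def n_from_base(n: str, base: int):
-- 	s = (string.digits + string.ascii_lowercase)[:base]
-- 	out = 0
-- 	unitval = 1
-- 	for d in n[::-1]:
-- 		out+= unitval * s.find(d.lower())
-- 		unitval *= base
-- 	return out
-- ===== SOURCE B (Python) =====
-- import string
--
-- def n_from_base(n: str, base: int):
-- 	# Horner's method: single left-to-right pass, no place-value variable.
-- 	s = (string.digits + string.ascii_lowercase)[:base]
-- 	out = 0
-- 	for d in n: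
-- 		out = out * base + s.find(d.lower())
-- 	return out
-- ===== Notes on version B (the rewrite author's own statement) =====
-- stated objective: idiomatic
-- what changed: Replaces the reversed-string traversal with a separate place-value accumulator (unitval) by a single forward Horner pass out = out*base + digit.
import Mathlib
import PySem

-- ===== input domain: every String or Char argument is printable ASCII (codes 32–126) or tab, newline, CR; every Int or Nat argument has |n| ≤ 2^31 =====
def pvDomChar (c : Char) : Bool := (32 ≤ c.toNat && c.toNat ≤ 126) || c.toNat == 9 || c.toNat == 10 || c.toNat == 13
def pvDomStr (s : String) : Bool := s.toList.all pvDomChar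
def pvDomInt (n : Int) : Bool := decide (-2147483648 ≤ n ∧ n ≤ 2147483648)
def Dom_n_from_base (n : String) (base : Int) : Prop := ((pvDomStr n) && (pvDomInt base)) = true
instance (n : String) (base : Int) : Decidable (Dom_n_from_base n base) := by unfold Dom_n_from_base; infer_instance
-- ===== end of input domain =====

-- B replaces A's reversed traversal with a place-value accumulator by a forward Horner pass (idiomatic; same cost).

-- ===== PORT A =====
-- A: s = (digits+lowercase)[:base]; out,unitval accumulated over n[::-1].
def n_from_base (n : String) (base : Int) : Int :=
  let s := PySem.List.slice ("0123456789abcdefghijklmnopqrstuvwxyz".toList) none (some base)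
  let rev := (PySem.List.slice? n.toList none none (-1)).getD []   -- n[::-1]; step = -1 never raises
  let r := rev.foldl
      (fun (st : Int × Int) d =>
        (st.1 + st.2 * PySem.Chars.find s (PySem.Chars.lower [d]), st.2 * base))
      ((0 : Int), (1 : Int))
  r.1

-- ===== PORT B =====
def n_from_base_alt (n : String) (base : Int) : Int :=
  let s := PySem.List.slice ("0123456789abcdefghijklmnopqrstuvwxyz".toList) none (some base)
  n.toList.foldl
    (fun (out : Int) d => out * base + PySem.Chars.find s (PySem.Chars.lower [d]))
    (0 : Int)

-- ===== PRECONDITION & SPEC =====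
def Spec_n_from_base (n : String) (base : Int) (out : Int) : Prop := out = n_from_base_alt n base
instance (n : String) (base : Int) (out : Int) : Decidable (Spec_n_from_base n base out) := by unfold Spec_n_from_base; infer_instance

-- ===== CLAIM (what is proved, stated in full; the proofs are below) =====
def Claim_equal_n_from_base : Prop := ∀ (n : String) (base : Int), Dom_n_from_base n base → Spec_n_from_base n base (n_from_base n base)

-- ===== LEMMAS AND PROOFS =====

-- little-endian value of a digit list (head is the least significant digit)
def pvL (s : List Char) (base : Int) : List Char → Int
  | [] => 0
  | d :: t => PySem.Chars.find s (PySem.Chars.lower [d]) + base * pvL s base t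

-- A's loop: the pair fold over a list starting from (o, u) yields o + u * pvL
theorem pvA_loop (s : List Char) (base : Int) (l : List Char) :
    ∀ o u : Int,
      (l.foldl (fun (st : Int × Int) d => (st.1 + st.2 * PySem.Chars.find s (PySem.Chars.lower [d]), st.2 * base)) (o, u)).1
        = o + u * pvL s base l := by
  induction l with
  | nil => intro o u; simp [pvL]
  | cons d t ih =>
      intro o u
      simp only [List.foldl, pvL]
      rw [ih]
      ring

-- B's loop over the reverse of l computes a * base^|l| + pvL l
theorem pvB_loop (s : List Char) (base : Int) (l : List Char) :
    ∀ a : Int,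
      l.reverse.foldl (fun (out : Int) d => out * base + PySem.Chars.find s (PySem.Chars.lower [d])) a
        = a * base ^ l.length + pvL s base l := by
  induction l with
  | nil => intro a; simp [pvL]
  | cons d t ih =>
      intro a
      simp only [List.reverse_cons, List.foldl_append, List.foldl, pvL, List.length_cons]
      rw [ih]
      ring

-- ===== VERDICT (by name: the statement is the Claim_ definition above) =====
theorem n_from_base_spec : Claim_equal_n_from_base := by
  intro n base _
  unfold Spec_n_from_base n_from_base n_from_base_alt
  simp only [PySem.List.slice?_none_none_neg_one, Option.getD_some]
  rw [pvA_loop _ base n.toList.reverse 0 1]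
  have hB := pvB_loop (PySem.List.slice "0123456789abcdefghijklmnopqrstuvwxyz".toList none (some base)) base n.toList.reverse 0
  rw [List.reverse_reverse] at hB
  rw [hB]
  ring
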